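-- pv_equiv track=rewrite | github.com/mrcodestealer/osedutybot | otpsmslog.py | format_otp_log_summary
-- ===== SOURCE A (Python) =====
-- from collections import Counter, defaultdict
--
-- _ATTENTION_STATUS_VALUES = frozenset({"FAILED", "PENDING"})
--
-- def _status_or_provider_needs_attention(st: str, pv: str) -> bool:
--     """True if Status or Provider Status is FAILED or PENDING (case-insensitive)."""
--     s = (st or "").strip().upper()
--     p = (pv or "").strip().upper()
--     return s in _ATTENTION_STATUS_VALUES or p in _ATTENTION_STATUS_VALUES
--
-- def format_otp_log_summary(counter: Counter, detail_rows=None) -> str: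
--     """
--     Lark / bot output: English only. Rows where Status or Provider Status is FAILED or PENDING,
--     grouped by Player ID with time range and count.
--     """
--     lines = ["As checked OTP logs:"]
--     if not counter:
--         lines.append("Status: (no rows), Provider Status: (no rows), Counts: 0")
--     else:
--         for (st, pv), n in sorted(counter.items(), key=lambda x: (x[0][0], x[0][1])):
--             lines.append(f"Status: {st}, Provider Status: {pv}, Counts: {n}")
--
--     attention_rows = []
--     if detail_rows:
--         for item in detail_rows:
--             if len(item) >= 5:
--                 _mid, pid, st, pv = item[0], item[1], item[2], item[3]
--                 tm = item[4] if len(item) > 4 else ""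
--             elif len(item) >= 3:
--                 pid, st, pv = item[0], item[1], item[2]
--                 tm = item[3] if len(item) > 3 else ""
--             else:
--                 continue
--             if _status_or_provider_needs_attention(st, pv):
--                 attention_rows.append((pid, st, pv, tm))
--
--     lines.append("")
--     lines.append("Player ID (FAILED or PENDING):")
--     if not attention_rows:
--         lines.append("(No FAILED or PENDING records)")
--     else:
--         by_player = defaultdict(list)
--         for pid, st, pv, tm in attention_rows:
--             key = (pid or "").strip() or "(no player id)"
--             by_player[key].append((st, pv, tm))
--
--         for pid_key in sorted(
--             by_player.keys(),
--             key=lambda k: (k == "(no player id)", k.upper() == "N/A", k),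
--         ):
--             entries = by_player[pid_key]
--             st0, pv0, _ = entries[0]
--             times_all = [(e[2] or "").strip() for e in entries if (e[2] or "").strip()]
--             cnt = len(entries)
--             disp = "N/A" if pid_key in ("(no player id)", "N/A") else pid_key
--             if not times_all:
--                 time_str = "Time range: —"
--             elif len(times_all) == 1:
--                 t0 = times_all[0]
--                 time_str = f"Time range: from {t0} to {t0}"
--             else:
--                 t_min = min(times_all)
--                 t_max = max(times_all)
--                 time_str = f"Time range: from {t_min} to {t_max}"
--             lines.append(
--                 f"Player ID: {disp}, Status: {st0}, Provider Status: {pv0}, "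
--                 f"{time_str}, Count: {cnt}"
--             )
--     return "\n".join(lines)
-- ===== SOURCE B (Python) =====
-- from collections import Counter
--
-- _ATTENTION = frozenset({"FAILED", "PENDING"})
--
--
-- def _needs_attention(st, pv):
--     return (st or "").strip().upper() in _ATTENTION or (pv or "").strip().upper() in _ATTENTION
--
--
-- def _parse_row(item):
--     """Return (pid, st, pv, tm) for a usable row, else None."""
--     if len(item) >= 5:
--         return item[1], item[2], item[3], item[4]
--     if len(item) >= 3:
--         return item[0], item[1], item[2], item[3] if len(item) > 3 else ""
--     return None
--
--
-- def format_otp_log_summary(counter: Counter, detail_rows=None) -> str: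
--     header = ["As checked OTP logs:"]
--     if counter:
--         header += [
--             f"Status: {st}, Provider Status: {pv}, Counts: {n}"
--             for (st, pv), n in sorted(counter.items(), key=lambda x: (x[0][0], x[0][1]))
--         ]
--     else:
--         header.append("Status: (no rows), Provider Status: (no rows), Counts: 0")
--
--     # one streaming pass: player key -> [st0, pv0, count, tmin, tmax, saw_time]
--     agg = {}
--     for item in detail_rows or []:
--         parsed = _parse_row(item)
--         if parsed is None:
--             continue
--         pid, st, pv, tm = parsed
--         if not _needs_attention(st, pv):
--             continue
--         key = (pid or "").strip() or "(no player id)"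
--         acc = agg.get(key)
--         if acc is None:
--             acc = [st, pv, 0, "", "", False]
--             agg[key] = acc
--         acc[2] += 1
--         t = (tm or "").strip()
--         if t:
--             if acc[5]:
--                 acc[3] = min(acc[3], t)
--                 acc[4] = max(acc[4], t)
--             else:
--                 acc[3] = acc[4] = t
--                 acc[5] = True
--
--     body = ["", "Player ID (FAILED or PENDING):"]
--     if not agg:
--         body.append("(No FAILED or PENDING records)")
--     else:
--         for key in sorted(agg, key=lambda k: (k == "(no player id)", k.upper() == "N/A", k)):
--             st0, pv0, cnt, tmin, tmax, saw = agg[key]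
--             disp = "N/A" if key in ("(no player id)", "N/A") else key
--             time_str = f"Time range: from {tmin} to {tmax}" if saw else "Time range: —"
--             body.append(
--                 f"Player ID: {disp}, Status: {st0}, Provider Status: {pv0}, {time_str}, Count: {cnt}"
--             )
--     return "\n".join(header + body)
-- ===== Notes on version B (the rewrite author's own statement) =====
-- stated objective: alternative
-- what changed: Replaces A's two-phase grouping (collect attention rows, build per-player lists in a defaultdict, then reduce each list for count/min/max) with a single streaming pass that maintains per-player aggregate records (first status/provider, count, running min/max time, saw_time flag) and emits lines directly from the aggregates.
import Mathlib
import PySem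

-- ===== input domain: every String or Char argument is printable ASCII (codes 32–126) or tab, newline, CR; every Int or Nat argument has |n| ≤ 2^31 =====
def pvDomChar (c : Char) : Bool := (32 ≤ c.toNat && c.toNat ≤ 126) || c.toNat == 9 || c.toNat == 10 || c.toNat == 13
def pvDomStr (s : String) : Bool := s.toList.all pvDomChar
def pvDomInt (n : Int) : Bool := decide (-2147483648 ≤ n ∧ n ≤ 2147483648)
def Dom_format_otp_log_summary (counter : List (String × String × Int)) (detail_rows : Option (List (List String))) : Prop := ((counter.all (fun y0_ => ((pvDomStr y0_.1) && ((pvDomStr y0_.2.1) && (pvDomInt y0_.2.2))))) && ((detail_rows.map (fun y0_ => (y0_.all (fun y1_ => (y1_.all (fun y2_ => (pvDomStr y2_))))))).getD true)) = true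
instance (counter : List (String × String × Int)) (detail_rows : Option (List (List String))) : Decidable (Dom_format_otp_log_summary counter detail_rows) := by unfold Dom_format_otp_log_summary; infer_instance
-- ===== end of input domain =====

-- B replaces A's two-phase group-then-reduce (collect attention rows, group lists per player,
-- then reduce each list) by a single streaming pass that maintains per-player aggregates
-- (first status/provider, count, running min/max time); objective: alternative decomposition.

-- ===== PORT A =====
-- _ATTENTION_STATUS_VALUES (frozenset; used only for membership, so set order is irrelevant)
def pvAttnStatusValues : PySem.Set String := PySem.Set.ofList ["FAILED", "PENDING"]

-- `(st or "")` is the identity input to .strip() (the empty string strips to itself), so it is dropped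
def statusOrProviderNeedsAttention (st pv : String) : Bool :=
  PySem.Set.contains pvAttnStatusValues (PySem.Str.upper (PySem.Str.strip st)) ||
  PySem.Set.contains pvAttnStatusValues (PySem.Str.upper (PySem.Str.strip pv))

def format_otp_log_summary (counter : List (String × String × Int)) (detail_rows : Option (List (List String))) : String :=
  let lines : List String := ["As checked OTP logs:"]
  let lines :=
    if counter.isEmpty then
      lines ++ ["Status: (no rows), Provider Status: (no rows), Counts: 0"]
    else
      (PySem.List.sorted2 counter (fun x => x.1) (fun x => x.2.1)).foldl
        (fun ls x =>
          ls ++ ["Status: " ++ x.1 ++ ", Provider Status: " ++ x.2.1 ++ ", Counts: " ++ PySem.Int.toStr x.2.2])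
        lines
  let rows := detail_rows.getD []
  -- `if detail_rows:` (None and [] are falsy) guards the row loop
  let attention_rows : List (String × String × String × String) :=
    if rows.isEmpty then [] else
      rows.foldl (fun acc item =>
        if 5 ≤ item.length then
          -- all indices below are in range under the length guards, so getD is exact
          let pid := item.getD 1 ""
          let st := item.getD 2 ""
          let pv := item.getD 3 ""
          let tm := item.getD 4 ""          -- `item[4] if len(item) > 4 else ""`: the guard holds here
          if statusOrProviderNeedsAttention st pv then acc ++ [(pid, st, pv, tm)] else acc
        else if 3 ≤ item.length then
          let pid := item.getD 0 ""
          let st := item.getD 1 ""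
          let pv := item.getD 2 ""
          let tm := if 3 < item.length then item.getD 3 "" else ""
          if statusOrProviderNeedsAttention st pv then acc ++ [(pid, st, pv, tm)] else acc
        else acc) []
  let lines := lines ++ [""]
  let lines := lines ++ ["Player ID (FAILED or PENDING):"]
  let lines :=
    if attention_rows.isEmpty then lines ++ ["(No FAILED or PENDING records)"]
    else
      let by_player : PySem.Dict String (List (String × String × String)) :=
        attention_rows.foldl
          (fun d r =>
            d.modify (if PySem.Str.strip r.1 == "" then "(no player id)" else PySem.Str.strip r.1)
              [] (fun l => l ++ [r.2]))
          PySem.Dict.empty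
      -- sort key (k == "(no player id)", k.upper() == "N/A", k): the leading Bool pair is encoded
      -- lexicographically exactly as the integer 2*b1 + b2
      (PySem.List.sorted2 by_player.keys
          (fun k => (if k == "(no player id)" then (2 : Int) else 0) +
                    (if PySem.Str.upper k == "N/A" then 1 else 0))
          (fun k => k)).foldl
        (fun ls k =>
          let entries := by_player.getD k []
          let e0 := entries.getD 0 ("", "", "")      -- entries[0]; entries is nonempty for a key of by_player
          -- the comprehension filters on the truthiness of the stripped time, so it equals map-then-filter
          let times_all := (entries.map (fun e => PySem.Str.strip e.2.2)).filter (fun t => t != "")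
          let cnt := entries.length
          let disp := if k == "(no player id)" || k == "N/A" then "N/A" else k
          let time_str :=
            if times_all.isEmpty then "Time range: —"
            else if times_all.length == 1 then
              let t0 := times_all.getD 0 ""
              "Time range: from " ++ t0 ++ " to " ++ t0
            else
              -- min/max of a nonempty list: the getD default is never used
              let t_min := (PySem.List.min? times_all (fun t => t)).getD ""
              let t_max := (PySem.List.max? times_all (fun t => t)).getD ""
              "Time range: from " ++ t_min ++ " to " ++ t_max
          ls ++ ["Player ID: " ++ disp ++ ", Status: " ++ e0.1 ++ ", Provider Status: " ++ e0.2.1 ++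
                 ", " ++ time_str ++ ", Count: " ++ PySem.Int.toStr (cnt : Int)])
        lines
  PySem.Str.join "\n" lines

-- ===== PORT B =====
-- per-player streaming accumulator [st0, pv0, count, tmin, tmax, saw_time]
structure PvAcc where
  st0 : String
  pv0 : String
  cnt : Int
  tmin : String
  tmax : String
  saw : Bool
deriving Repr, DecidableEq, Inhabited

def pvAttention : PySem.Set String := PySem.Set.ofList ["FAILED", "PENDING"]

def pvNeedsAttention (st pv : String) : Bool :=
  PySem.Set.contains pvAttention (PySem.Str.upper (PySem.Str.strip st)) ||
  PySem.Set.contains pvAttention (PySem.Str.upper (PySem.Str.strip pv))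

-- _parse_row: (pid, st, pv, tm) for a usable row, else None (indices in range under the guards)
def pvParseRow (item : List String) : Option (String × String × String × String) :=
  if 5 ≤ item.length then
    some (item.getD 1 "", item.getD 2 "", item.getD 3 "", item.getD 4 "")
  else if 3 ≤ item.length then
    some (item.getD 0 "", item.getD 1 "", item.getD 2 "", if 3 < item.length then item.getD 3 "" else "")
  else none

-- `(pid or "").strip() or "(no player id)"`
def pvKey (pid : String) : String :=
  if PySem.Str.strip pid == "" then "(no player id)" else PySem.Str.strip pid

-- the body of B's streaming update for one row (acc fetch with default, count, time fold)
def pvUpd (o : Option PvAcc) (st pv tm : String) : PvAcc :=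
  let a := o.getD { st0 := st, pv0 := pv, cnt := 0, tmin := "", tmax := "", saw := false }
  let a := { a with cnt := a.cnt + 1 }
  let t := PySem.Str.strip tm
  if t != "" then
    if a.saw then { a with tmin := min a.tmin t, tmax := max a.tmax t }
    else { a with tmin := t, tmax := t, saw := true }
  else a

def format_otp_log_summary_alt (counter : List (String × String × Int)) (detail_rows : Option (List (List String))) : String :=
  let header := "As checked OTP logs:" ::
    (if counter.isEmpty then ["Status: (no rows), Provider Status: (no rows), Counts: 0"]
     else
       (PySem.List.sorted2 counter (fun x => x.1) (fun x => x.2.1)).map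
         (fun x => "Status: " ++ x.1 ++ ", Provider Status: " ++ x.2.1 ++ ", Counts: " ++ PySem.Int.toStr x.2.2))
  let agg : PySem.Dict String PvAcc :=
    (detail_rows.getD []).foldl
      (fun agg item =>
        match pvParseRow item with
        | none => agg
        | some (pid, st, pv, tm) =>
          if pvNeedsAttention st pv then
            agg.insert (pvKey pid) (pvUpd (agg.get? (pvKey pid)) st pv tm)
          else agg)
      PySem.Dict.empty
  let body := "" :: "Player ID (FAILED or PENDING):" ::
    (if agg.size == 0 then ["(No FAILED or PENDING records)"]
     else
       (PySem.List.sorted2 agg.keys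
           (fun k => (if k == "(no player id)" then (2 : Int) else 0) +
                     (if PySem.Str.upper k == "N/A" then 1 else 0))
           (fun k => k)).map
         (fun k =>
           let a := (agg.get? k).getD default     -- agg[k]; k is a key of agg, so get? is some
           let disp := if k == "(no player id)" || k == "N/A" then "N/A" else k
           let time_str :=
             if a.saw then "Time range: from " ++ a.tmin ++ " to " ++ a.tmax
             else "Time range: —"
           "Player ID: " ++ disp ++ ", Status: " ++ a.st0 ++ ", Provider Status: " ++ a.pv0 ++
           ", " ++ time_str ++ ", Count: " ++ PySem.Int.toStr a.cnt))
  PySem.Str.join "\n" (header ++ body)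

-- ===== PRECONDITION & SPEC =====
def Spec_format_otp_log_summary (counter : List (String × String × Int)) (detail_rows : Option (List (List String))) (out : String) : Prop := out = format_otp_log_summary_alt counter detail_rows
instance (counter : List (String × String × Int)) (detail_rows : Option (List (List String))) (out : String) : Decidable (Spec_format_otp_log_summary counter detail_rows out) := by unfold Spec_format_otp_log_summary; infer_instance

-- ===== CLAIM (what is proved, stated in full; the proofs are below) =====
def Claim_equal_format_otp_log_summary : Prop := ∀ (counter : List (String × String × Int)) (detail_rows : Option (List (List String))), Dom_format_otp_log_summary counter detail_rows → Spec_format_otp_log_summary counter detail_rows (format_otp_log_summary counter detail_rows)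

-- ===== LEMMAS AND PROOFS =====

-- the attention rows one detail row contributes (shared normal form of both loops)
def pvRowOut (item : List String) : List (String × String × String × String) :=
  match pvParseRow item with
  | none => []
  | some (pid, st, pv, tm) => if pvNeedsAttention st pv then [(pid, st, pv, tm)] else []

-- A's row loop collects exactly the concatenation of the per-row contributions
lemma a_att_rows (rows : List (List String)) (acc : List (String × String × String × String)) :
    rows.foldl (fun acc item =>
        if 5 ≤ item.length then
          let pid := item.getD 1 ""
          let st := item.getD 2 ""
          let pv := item.getD 3 ""
          let tm := item.getD 4 ""
          if statusOrProviderNeedsAttention st pv then acc ++ [(pid, st, pv, tm)] else acc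
        else if 3 ≤ item.length then
          let pid := item.getD 0 ""
          let st := item.getD 1 ""
          let pv := item.getD 2 ""
          let tm := if 3 < item.length then item.getD 3 "" else ""
          if statusOrProviderNeedsAttention st pv then acc ++ [(pid, st, pv, tm)] else acc
        else acc) acc
      = acc ++ rows.flatMap pvRowOut := by
  rw [PySem.List.foldl_congr_mem _ _ (fun acc item => acc ++ pvRowOut item) _ ?_,
    PySem.List.foldl_append_eq_flatMap]
  intro acc item _
  have hsame : statusOrProviderNeedsAttention = pvNeedsAttention := rfl
  simp only [pvRowOut, pvParseRow, hsame]
  split_ifs <;> simp_all [List.getD]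

-- B's row loop is the same stream run over the per-row contributions
lemma b_att_rows (rows : List (List String)) (d : PySem.Dict String PvAcc) :
    rows.foldl
      (fun agg item =>
        match pvParseRow item with
        | none => agg
        | some (pid, st, pv, tm) =>
          if pvNeedsAttention st pv then
            agg.insert (pvKey pid) (pvUpd (agg.get? (pvKey pid)) st pv tm)
          else agg) d
      = (rows.flatMap pvRowOut).foldl
          (fun agg r => agg.insert (pvKey r.1) (pvUpd (agg.get? (pvKey r.1)) r.2.1 r.2.2.1 r.2.2.2)) d := by
  induction rows generalizing d with
  | nil => rfl
  | cons item rows ih =>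
    simp only [List.foldl_cons, List.flatMap_cons, List.foldl_append]
    rw [ih]
    congr 1
    simp only [pvRowOut]
    rcases h : pvParseRow item with _ | ⟨pid, st, pv, tm⟩ <;> simp only []
    · rfl
    · by_cases hn : pvNeedsAttention st pv <;> simp [hn]

-- the per-entry reduction step of B's stream, over the grouped payload (st, pv, tm) triples
def pvStepU (a : PvAcc) (e : String × String × String) : PvAcc :=
  pvUpd (some a) e.1 e.2.1 e.2.2

-- the time part of one streaming update, on the (tmin, tmax, saw) triple
def pvTimeStep (tr : String × String × Bool) (t : String) : String × String × Bool :=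
  if tr.2.2 then (min tr.1 t, max tr.2.1 t, true) else (t, t, true)

-- B's per-key stream over the grouped entries, made explicit
def pvFoldEs (es : List (String × String × String)) : Option PvAcc :=
  es.foldl (fun o e => some (pvUpd o e.1 e.2.1 e.2.2)) none

lemma stream_get? (l : List (String × (String × String × String))) (d : PySem.Dict String PvAcc) (c : String) :
    (l.foldl (fun agg p => agg.insert p.1 (pvUpd (agg.get? p.1) p.2.1 p.2.2.1 p.2.2.2)) d).get? c
    = (l.filter (fun p => p.1 == c)).foldl (fun o p => some (pvUpd o p.2.1 p.2.2.1 p.2.2.2)) (d.get? c) := by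
  induction l generalizing d with
  | nil => rfl
  | cons p l ih =>
    simp only [List.foldl_cons, List.filter_cons]
    rw [ih]
    by_cases h : p.1 = c
    · simp only [h, beq_self_eq_true, if_pos, List.foldl_cons, PySem.Dict.get?_insert]
    · have hb : (p.1 == c) = false := by simp [h]
      simp only [hb, Bool.false_eq_true, if_false, PySem.Dict.get?_insert]
      rw [if_neg (fun hc => h hc.symm)]

lemma foldl_some (a : PvAcc) (ts : List (String × String × String)) :
    ts.foldl (fun o e => some (pvUpd o e.1 e.2.1 e.2.2)) (some a) = some (ts.foldl pvStepU a) := by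
  induction ts generalizing a with
  | nil => rfl
  | cons e ts ih => simp only [List.foldl_cons, ih]; rfl

lemma pvUpd_fields (a : PvAcc) (st pv tm : String) :
    (pvUpd (some a) st pv tm).st0 = a.st0 ∧ (pvUpd (some a) st pv tm).pv0 = a.pv0 ∧
    (pvUpd (some a) st pv tm).cnt = a.cnt + 1 ∧
    ((pvUpd (some a) st pv tm).tmin, (pvUpd (some a) st pv tm).tmax, (pvUpd (some a) st pv tm).saw)
      = (if PySem.Str.strip tm != "" then pvTimeStep (a.tmin, a.tmax, a.saw) (PySem.Str.strip tm)
         else (a.tmin, a.tmax, a.saw)) := by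
  simp only [pvUpd, pvTimeStep, Option.getD_some]
  split_ifs <;> simp_all

lemma foldl_stepU_fields (a : PvAcc) (ts : List (String × String × String)) :
    (ts.foldl pvStepU a).st0 = a.st0 ∧ (ts.foldl pvStepU a).pv0 = a.pv0 ∧
    (ts.foldl pvStepU a).cnt = a.cnt + ts.length ∧
    ((ts.foldl pvStepU a).tmin, (ts.foldl pvStepU a).tmax, (ts.foldl pvStepU a).saw)
      = ts.foldl (fun tr e =>
          if PySem.Str.strip e.2.2 != "" then pvTimeStep tr (PySem.Str.strip e.2.2) else tr)
          (a.tmin, a.tmax, a.saw) := by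
  induction ts generalizing a with
  | nil => simp
  | cons e ts ih =>
    simp only [List.foldl_cons, List.length_cons]
    obtain ⟨h1, h2, h3, h4⟩ := pvUpd_fields a e.1 e.2.1 e.2.2
    obtain ⟨g1, g2, g3, g4⟩ := ih (pvStepU a e)
    simp only [pvStepU] at g1 g2 g3 g4 ⊢
    refine ⟨by rw [g1]; exact h1, by rw [g2]; exact h2,
      by rw [g3, h3]; push_cast; ring, ?_⟩
    rw [g4, h4]

lemma timeStep_true (m M : String) (l : List String) :
    l.foldl pvTimeStep (m, M, true) = (l.foldl min m, l.foldl max M, true) := by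
  induction l generalizing m M with
  | nil => rfl
  | cons t l ih => simp only [List.foldl_cons, pvTimeStep, if_pos]; exact ih _ _

lemma pvUpd_none (st pv tm : String) :
    (pvUpd none st pv tm).st0 = st ∧ (pvUpd none st pv tm).pv0 = pv ∧
    (pvUpd none st pv tm).cnt = 1 ∧
    ((pvUpd none st pv tm).tmin, (pvUpd none st pv tm).tmax, (pvUpd none st pv tm).saw)
      = (if PySem.Str.strip tm != "" then pvTimeStep ("", "", false) (PySem.Str.strip tm)
         else ("", "", false)) := by
  simp only [pvUpd, pvTimeStep, Option.getD_none]
  split_ifs <;> simp_all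

-- the grouped entries of one player key produce the same line streamed or reduced in bulk
lemma emit_eq_es (k : String) (es : List (String × String × String)) (hne : es ≠ []) :
    (("Player ID: " ++ if (k == "(no player id)" || k == "N/A") then "N/A" else k) ++ ", Status: " ++
        (es.getD 0 ("", "", "")).1 ++ ", Provider Status: " ++ (es.getD 0 ("", "", "")).2.1 ++ ", " ++
        (if (List.filter (fun t => t != "") (List.map (fun e => PySem.Str.strip e.2.2) es)).isEmpty then
          "Time range: —"
        else if ((List.filter (fun t => t != "") (List.map (fun e => PySem.Str.strip e.2.2) es)).length == 1) then
          "Time range: from " ++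
            (List.filter (fun t => t != "") (List.map (fun e => PySem.Str.strip e.2.2) es)).getD 0 "" ++
            " to " ++ (List.filter (fun t => t != "") (List.map (fun e => PySem.Str.strip e.2.2) es)).getD 0 ""
        else
          "Time range: from " ++
            (PySem.List.min? (List.filter (fun t => t != "") (List.map (fun e => PySem.Str.strip e.2.2) es)) (fun t => t)).getD "" ++
            " to " ++
            (PySem.List.max? (List.filter (fun t => t != "") (List.map (fun e => PySem.Str.strip e.2.2) es)) (fun t => t)).getD "") ++
        ", Count: " ++ PySem.Int.toStr (es.length : Int))
    = (("Player ID: " ++ if (k == "(no player id)" || k == "N/A") then "N/A" else k) ++ ", Status: " ++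
        ((pvFoldEs es).getD default).st0 ++ ", Provider Status: " ++ ((pvFoldEs es).getD default).pv0 ++ ", " ++
        (if ((pvFoldEs es).getD default).saw then
          "Time range: from " ++ ((pvFoldEs es).getD default).tmin ++ " to " ++ ((pvFoldEs es).getD default).tmax
        else "Time range: —") ++
        ", Count: " ++ PySem.Int.toStr ((pvFoldEs es).getD default).cnt) := by
  obtain ⟨e, ts, rfl⟩ := List.exists_cons_of_ne_nil hne
  have hfold : pvFoldEs (e :: ts) = some (ts.foldl pvStepU (pvUpd none e.1 e.2.1 e.2.2)) := by
    rw [pvFoldEs, List.foldl_cons, foldl_some]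
  rw [hfold]
  simp only [Option.getD_some]
  obtain ⟨ha1, ha2, ha3, ha4⟩ := pvUpd_none e.1 e.2.1 e.2.2
  obtain ⟨hg1, hg2, hg3, hg4⟩ := foldl_stepU_fields (pvUpd none e.1 e.2.1 e.2.2) ts
  set r := ts.foldl pvStepU (pvUpd none e.1 e.2.1 e.2.2) with hr
  -- the time triple of the stream over all entries is the fold over the nonempty stripped times
  have htr : (r.tmin, r.tmax, r.saw)
      = (List.filter (fun t => t != "") (List.map (fun e => PySem.Str.strip e.2.2) (e :: ts))).foldl
          pvTimeStep ("", "", false) := by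
    rw [hg4, ha4]
    have hmapfold : ∀ (init : String × String × Bool) (l : List (String × String × String)),
        l.foldl (fun tr e => if PySem.Str.strip e.2.2 != "" then pvTimeStep tr (PySem.Str.strip e.2.2) else tr) init
        = (List.filter (fun t => t != "") (List.map (fun e => PySem.Str.strip e.2.2) l)).foldl pvTimeStep init := by
      intro init l
      rw [← PySem.List.foldl_if_eq_foldl_filter (fun t => t != "") pvTimeStep, List.foldl_map]
    rw [hmapfold, List.map_cons, List.filter_cons]
    by_cases he : PySem.Str.strip e.2.2 != ""
    · simp only [he, if_pos, List.foldl_cons]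
    · simp only [he, Bool.false_eq_true, if_false]
  have hst : r.st0 = e.1 := by rw [hg1, ha1]
  have hpv : r.pv0 = e.2.1 := by rw [hg2, ha2]
  have hcnt : PySem.Int.toStr ((e :: ts).length : Int) = PySem.Int.toStr r.cnt := by
    refine congrArg PySem.Int.toStr ?_
    rw [hg3, ha3]
    simp only [List.length_cons]
    push_cast
    ring
  rw [hcnt, hst, hpv]
  refine congrArg₂ (· ++ ·) (congrArg₂ (· ++ ·) ?_ rfl) rfl
  refine congrArg₂ (· ++ ·) rfl ?_
  -- the time strings agree, by cases on the nonempty stripped times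
  rcases hti : List.filter (fun t => t != "") (List.map (fun e => PySem.Str.strip e.2.2) (e :: ts)) with _ | ⟨t, rest⟩
  · rw [hti] at htr
    have hsaw : r.saw = false := congrArg (fun p => p.2.2) htr
    rw [hti, hsaw]
    rfl
  · rw [hti] at htr
    have hstep : (t :: rest).foldl pvTimeStep ("", "", false) = (rest.foldl min t, rest.foldl max t, true) := by
      rw [List.foldl_cons]
      rw [show pvTimeStep ("", "", false) t = (t, t, true) from rfl, timeStep_true]
    rw [hstep] at htr
    have hsaw : r.saw = true := congrArg (fun p => p.2.2) htr
    have hmin : r.tmin = rest.foldl min t := congrArg (fun p => p.1) htr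
    have hmax : r.tmax = rest.foldl max t := congrArg (fun p => p.2.1) htr
    rw [hti, hsaw, hmin, hmax]
    rcases rest with _ | ⟨t2, rest'⟩
    · rfl
    · have hlen : (((t :: t2 :: rest').length == 1)) = false := by
        refine beq_eq_false_iff_ne.mpr ?_
        simp
      rw [if_neg (by simp), hlen]
      simp only [Bool.false_eq_true, if_false, if_true]
      rw [PySem.List.min?_id_cons, PySem.List.max?_id_cons]
      rfl

-- ===== VERDICT (by name: the statement is the Claim_ definition above) =====
theorem format_otp_log_summary_spec : Claim_equal_format_otp_log_summary := by
  intro counter dr _hdom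
  unfold Spec_format_otp_log_summary
  simp only [format_otp_log_summary, format_otp_log_summary_alt]
  rw [a_att_rows (dr.getD []) [], b_att_rows]
  have hatt : (if (dr.getD []).isEmpty = true then [] else [] ++ List.flatMap pvRowOut (dr.getD []))
      = List.flatMap pvRowOut (dr.getD []) := by
    cases dr.getD [] <;> simp
  rw [hatt]
  generalize List.flatMap pvRowOut (dr.getD []) = att
  rw [PySem.List.foldl_append_singleton_eq_map
    (fun x : String × String × Int => "Status: " ++ x.1 ++ ", Provider Status: " ++ x.2.1 ++ ", Counts: " ++ PySem.Int.toStr x.2.2)]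
  have hkfun : (fun (d : PySem.Dict String (List (String × String × String))) (r : String × String × String × String) =>
      d.modify (if (PySem.Str.strip r.1 == "") = true then "(no player id)" else PySem.Str.strip r.1) [] (fun l => l ++ [r.2]))
      = (fun d r => d.modify (pvKey r.1) [] (fun l => l ++ [r.2])) := rfl
  rw [hkfun]
  have hA : List.foldl (fun d r => d.modify (pvKey r.1) [] (fun l => l ++ [r.2])) PySem.Dict.empty att
      = List.foldl (fun d p => d.modify p.1 [] (fun x => x ++ [p.2])) PySem.Dict.empty
          (att.map (fun r => (pvKey r.1, r.2))) := by
    rw [List.foldl_map]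
  have hB : List.foldl (fun agg r => agg.insert (pvKey r.1) (pvUpd (agg.get? (pvKey r.1)) r.2.1 r.2.2.1 r.2.2.2)) PySem.Dict.empty att
      = List.foldl (fun agg p => agg.insert p.1 (pvUpd (agg.get? p.1) p.2.1 p.2.2.1 p.2.2.2)) PySem.Dict.empty
          (att.map (fun r => (pvKey r.1, r.2))) := by
    rw [List.foldl_map]
  rw [hA, hB]
  generalize hps : att.map (fun r => (pvKey r.1, r.2)) = ps
  have hkeysB : (List.foldl (fun agg p => agg.insert p.1 (pvUpd (agg.get? p.1) p.2.1 p.2.2.1 p.2.2.2)) PySem.Dict.empty ps).keys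
      = PySem.Set.ofList (ps.map (fun p => p.1)) := by
    rw [PySem.Dict.keys_foldl_insert_key ps (fun p => p.1)
      (fun d p => pvUpd (d.get? p.1) p.2.1 p.2.2.1 p.2.2.2) PySem.Dict.empty]
    rw [PySem.Dict.keys_empty, PySem.Set.update_nil_left]
  have hkeysA : (List.foldl (fun d p => d.modify p.1 [] (fun x => x ++ [p.2])) PySem.Dict.empty ps).keys
      = PySem.Set.ofList (ps.map (fun p => p.1)) := by
    rw [PySem.Dict.keys_foldl_modify_key ps (fun p => p.1) [] (fun d p l => l ++ [p.2]) PySem.Dict.empty]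
    rw [PySem.Dict.keys_empty, PySem.Set.update_nil_left]
  cases att with
  | nil =>
    simp only [List.map_nil] at hps
    subst hps
    by_cases hc : counter.isEmpty <;> simp [hc]
  | cons r att' =>
    have hk0 : pvKey r.1 ∈ (List.foldl (fun agg p => agg.insert p.1 (pvUpd (agg.get? p.1) p.2.1 p.2.2.1 p.2.2.2)) PySem.Dict.empty ps).keys := by
      rw [hkeysB, PySem.Set.mem_ofList, ← hps]
      simp
    have hsz : ((List.foldl (fun agg p => agg.insert p.1 (pvUpd (agg.get? p.1) p.2.1 p.2.2.1 p.2.2.2)) PySem.Dict.empty ps).size == 0) = false := by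
      rcases hitems : (List.foldl (fun agg p => agg.insert p.1 (pvUpd (agg.get? p.1) p.2.1 p.2.2.1 p.2.2.2)) PySem.Dict.empty ps).items with _ | ⟨p, items⟩
      · exfalso
        simp only [PySem.Dict.keys, hitems, List.map_nil, List.not_mem_nil] at hk0
      · simp [PySem.Dict.size, hitems]
    rw [hsz]
    simp only [List.isEmpty_cons, Bool.false_eq_true, if_false]
    rw [PySem.List.foldl_append_singleton_eq_map]
    rw [hkeysA, hkeysB]
    apply congrArg (PySem.Str.join "\n")
    by_cases hc : counter.isEmpty = true
    · rw [if_pos hc, if_pos hc]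
      simp only [List.cons_append, List.nil_append]
      refine congrArg (List.cons _) (congrArg (List.cons _) (congrArg (List.cons _) (congrArg (List.cons _) ?_)))
      apply List.map_congr_left
      intro k hk
      rw [PySem.Dict.getD_foldl_modify_append ps PySem.Dict.empty k, PySem.Dict.getD_empty,
        List.nil_append, stream_get? ps PySem.Dict.empty k, PySem.Dict.get?_empty]
      have hq : List.filter (fun p => p.1 == k) ps ≠ [] := by
        have hkmem : k ∈ List.map (fun p => p.1) ps :=
          (PySem.Set.mem_ofList _ _).mp (((PySem.List.sorted2_perm _ _ _ _).mem_iff).mp hk)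
        obtain ⟨p, hp, hpk⟩ := List.mem_map.mp hkmem
        exact List.ne_nil_of_mem (List.mem_filter.mpr ⟨hp, by simp [hpk]⟩)
      have hBfold : List.foldl (fun o p => some (pvUpd o p.2.1 p.2.2.1 p.2.2.2)) none (List.filter (fun p => p.1 == k) ps)
          = pvFoldEs (List.map (fun x => x.2) (List.filter (fun p => p.1 == k) ps)) := by
        rw [pvFoldEs, List.foldl_map]
      rw [hBfold]
      exact emit_eq_es k _ (by simpa using hq)
    · rw [if_neg hc, if_neg hc]
      simp only [List.cons_append, List.nil_append, List.append_assoc]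
      refine congrArg (List.cons _) (congrArg (_ ++ ·) (congrArg (List.cons _) (congrArg (List.cons _) ?_)))
      apply List.map_congr_left
      intro k hk
      rw [PySem.Dict.getD_foldl_modify_append ps PySem.Dict.empty k, PySem.Dict.getD_empty,
        List.nil_append, stream_get? ps PySem.Dict.empty k, PySem.Dict.get?_empty]
      have hq : List.filter (fun p => p.1 == k) ps ≠ [] := by
        have hkmem : k ∈ List.map (fun p => p.1) ps :=
          (PySem.Set.mem_ofList _ _).mp (((PySem.List.sorted2_perm _ _ _ _).mem_iff).mp hk)
        obtain ⟨p, hp, hpk⟩ := List.mem_map.mp hkmem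
        exact List.ne_nil_of_mem (List.mem_filter.mpr ⟨hp, by simp [hpk]⟩)
      have hBfold : List.foldl (fun o p => some (pvUpd o p.2.1 p.2.2.1 p.2.2.2)) none (List.filter (fun p => p.1 == k) ps)
          = pvFoldEs (List.map (fun x => x.2) (List.filter (fun p => p.1 == k) ps)) := by
        rw [pvFoldEs, List.foldl_map]
      rw [hBfold]
      exact emit_eq_es k _ (by simpa using hq)
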